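-- pv_equiv track=rewrite | github.com/Zeydel/Advent-Of-Code | AoC16/Day06/Day06.py | getMostAndLeastFrequent
-- ===== SOURCE A (Python) =====
-- def getMostAndLeastFrequent(letters):
--
--     # A dict
--     countDict = dict()
--
--     # For each letter, count it
--     for l in letters:
--         if not l in countDict:
--             countDict[l] = 0
--         countDict[l] += 1
--
--     # Sort it according to letter count
--     sortedDict = sorted(countDict, key=lambda l: -countDict[l])
--
--     # Return most and least frequent element
--     return (sortedDict[0], sortedDict[-1])
-- ===== SOURCE B (Python) =====
-- def getMostAndLeastFrequent(letters):
--     # One pass to count, then a single linear scan over the keys in insertion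
--     # order instead of sorting: the first strict maximum is the most frequent
--     # (matching the stable descending sort's head), and the last minimum
--     # (<= update) is the least frequent (matching the sort's tail); same result.
--     counts = {}
--     for l in letters:
--         counts[l] = counts.get(l, 0) + 1
--     keys = list(counts)
--     most = least = keys[0]
--     for k in keys[1:]:
--         if counts[k] > counts[most]:
--             most = k
--         if counts[k] <= counts[least]:
--             least = k
--     return (most, least)
-- ===== Notes on version B (the rewrite author's own statement) =====
-- stated objective: alternative
-- what changed: Replaces the sort of the count-dict keys by a single linear scan over the keys in insertion order maintaining the running most (strict > update, first argmax) and least (<= update, last argmin) frequent keys.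
-- outside the precondition, e.g. on getMostAndLeastFrequent([]): A raises IndexError, B raises IndexError
import Mathlib
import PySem

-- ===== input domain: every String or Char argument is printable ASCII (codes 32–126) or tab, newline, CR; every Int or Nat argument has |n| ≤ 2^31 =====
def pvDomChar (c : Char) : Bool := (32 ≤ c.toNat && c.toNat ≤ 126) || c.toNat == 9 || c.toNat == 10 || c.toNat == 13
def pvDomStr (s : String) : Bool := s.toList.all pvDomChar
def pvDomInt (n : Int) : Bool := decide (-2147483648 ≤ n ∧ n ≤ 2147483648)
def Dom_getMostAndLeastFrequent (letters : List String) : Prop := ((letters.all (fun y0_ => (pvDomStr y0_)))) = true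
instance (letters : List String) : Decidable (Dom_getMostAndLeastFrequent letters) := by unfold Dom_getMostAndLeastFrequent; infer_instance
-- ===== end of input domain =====

-- B replaces A's sort of the count-dict keys by one linear scan keeping the running
-- most (strict >) and least (≤) frequent key; equivalence is about the return value.

-- ===== PORT A =====
def pvAStep (d : PySem.Dict String Int) (l : String) : PySem.Dict String Int :=
  let d1 := if d.contains l = false then d.insert l 0 else d
  -- countDict[l] += 1 : l is present in d1, so getD is the exact lookup
  d1.insert l (d1.getD l 0 + 1)

def getMostAndLeastFrequent (letters : List String) : String × String :=
  let countDict := letters.foldl pvAStep PySem.Dict.empty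
  -- key=lambda l: -countDict[l] : every sorted element is a key, so getD is exact
  let sortedDict := PySem.List.sorted countDict.keys (fun l => -(countDict.getD l 0)) false
  -- sortedDict[0] / sortedDict[-1] raise IndexError on the empty list; Pre_ excludes it
  (PySem.List.pyGetD sortedDict 0 "", PySem.List.pyGetD sortedDict (-1) "")

-- ===== PORT B =====
def pvBStep (counts : PySem.Dict String Int) (ml : String × String) (k : String) : String × String :=
  -- counts[k] / counts[most] / counts[least] : all are keys of counts, so getD is exact
  (if counts.getD k 0 > counts.getD ml.1 0 then k else ml.1,
   if counts.getD k 0 ≤ counts.getD ml.2 0 then k else ml.2)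

def getMostAndLeastFrequent_alt (letters : List String) : String × String :=
  let counts := letters.foldl (fun d l => d.insert l (d.getD l 0 + 1)) PySem.Dict.empty
  match counts.keys with
  | [] => ("", "")            -- keys[0] raises IndexError in Python; Pre_ excludes this
  | k0 :: rest => rest.foldl (pvBStep counts) (k0, k0)

-- ===== PRECONDITION & SPEC =====
-- Pre_ excludes only the empty list, on which both A and B raise IndexError.
def Pre_getMostAndLeastFrequent (letters : List String) : Prop := letters ≠ []
instance (letters : List String) : Decidable (Pre_getMostAndLeastFrequent letters) := by
  unfold Pre_getMostAndLeastFrequent; infer_instance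

def pvWitness_getMostAndLeastFrequent : List String := ["a", "b", "a"]

def Spec_getMostAndLeastFrequent (letters : List String) (out : String × String) : Prop :=
  out = getMostAndLeastFrequent_alt letters
instance (letters : List String) (out : String × String) :
    Decidable (Spec_getMostAndLeastFrequent letters out) := by
  unfold Spec_getMostAndLeastFrequent; infer_instance

-- ===== CLAIM =====
def Claim_equal_getMostAndLeastFrequent : Prop :=
  ∀ (letters : List String), Dom_getMostAndLeastFrequent letters →
    Pre_getMostAndLeastFrequent letters →
    Spec_getMostAndLeastFrequent letters (getMostAndLeastFrequent letters)

-- ===== LEMMAS AND PROOFS =====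

-- insertion step of A's count loop equals B's
theorem pvAStep_eq (d : PySem.Dict String Int) (l : String) :
    pvAStep d l = d.insert l (d.getD l 0 + 1) := by
  unfold pvAStep
  cases h : d.contains l with
  | false =>
      rw [if_pos rfl]
      show (d.insert l 0).insert l ((d.insert l 0).getD l 0 + 1) = d.insert l (d.getD l 0 + 1)
      rw [PySem.Dict.getD_insert_self, PySem.Dict.insert_insert_self,
        PySem.Dict.getD_of_not_contains d 0 h]
  | true => rw [if_neg (by simp)]

-- the insertBy used by sorted, specialised to key = -(c ·)
def pvIns (c : String → Int) (x : String) (ys : List String) : List String :=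
  PySem.List.insertBy (fun a b => decide (-(c a) < -(c b))) x ys

theorem pvIns_nil (c : String → Int) (x : String) : pvIns c x [] = [x] := rfl

theorem pvIns_cons (c : String → Int) (x y : String) (ys : List String) :
    pvIns c x (y :: ys) =
      if -(c x) < -(c y) then x :: y :: ys else y :: pvIns c x ys := by
  simp [pvIns, PySem.List.insertBy]

theorem pvIns_ne_nil (c : String → Int) (x : String) (ys : List String) :
    pvIns c x ys ≠ [] := by
  cases ys with
  | nil => simp [pvIns_nil]
  | cons y t => rw [pvIns_cons]; split <;> simp

theorem head?_pvIns (c : String → Int) (x : String) (ys : List String) (m : String)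
    (hm : ys.head? = some m) :
    (pvIns c x ys).head? = some (if c x > c m then x else m) := by
  cases ys with
  | nil => simp at hm
  | cons y t =>
      have h' : y = m := by simpa using hm
      rw [← h', pvIns_cons]
      by_cases h : c x > c y
      · rw [if_pos (by omega), if_pos h]; rfl
      · rw [if_neg (by omega), if_neg h]; rfl

theorem pairwise_pvIns (c : String → Int) (x : String) (ys : List String)
    (hp : ys.Pairwise (fun a b => -(c a) ≤ -(c b))) :
    (pvIns c x ys).Pairwise (fun a b => -(c a) ≤ -(c b)) := by
  induction ys with
  | nil => simp [pvIns_nil]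
  | cons y t ih =>
      rw [pvIns_cons]
      rcases List.pairwise_cons.mp hp with ⟨hy, ht⟩
      split
      · rename_i hlt
        refine List.pairwise_cons.mpr ⟨?_, hp⟩
        intro b hb
        rcases List.mem_cons.mp hb with rfl | hb
        · omega
        · have := hy _ hb; omega
      · rename_i hge
        refine List.pairwise_cons.mpr ⟨?_, ih ht⟩
        intro b hb
        rcases (PySem.List.mem_insertBy _ x b t).mp hb with rfl | hb
        · omega
        · exact hy _ hb

theorem getLast?_pvIns (c : String → Int) (x : String) (ys : List String) (l : String)
    (hp : ys.Pairwise (fun a b => -(c a) ≤ -(c b)))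
    (hl : ys.getLast? = some l) :
    (pvIns c x ys).getLast? = some (if c x ≤ c l then x else l) := by
  induction ys with
  | nil => simp at hl
  | cons y t ih =>
      rcases List.pairwise_cons.mp hp with ⟨hy, ht⟩
      rw [pvIns_cons]
      cases t with
      | nil =>
          have h' : y = l := by simpa using hl
          rw [← h']
          by_cases h : c x ≤ c y
          · rw [if_neg (by omega), if_pos h]
            simp [pvIns_nil]
          · rw [if_pos (by omega), if_neg h]
            simp
      | cons z t' =>
          have hlz : (z :: t').getLast? = some l := by
            simpa using hl
          have hlmem : l ∈ z :: t' := by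
            have h2 := List.getLast?_eq_some_getLast (l := z :: t') (by simp)
            rw [hlz] at h2
            have h3 : l = (z :: t').getLast (by simp) := by
              simpa using h2
            rw [h3]; exact List.getLast_mem _
          have hyl : -(c y) ≤ -(c l) := hy _ hlmem
          split
          · rename_i hlt
            -- x inserted at the front; last unchanged, and c l < c x
            have : ¬ (c x ≤ c l) := by omega
            rw [if_neg this]
            simpa using hlz
          · obtain ⟨w, ws, hw⟩ := List.exists_cons_of_ne_nil (pvIns_ne_nil c x (z :: t'))
            rw [hw, List.getLast?_cons_cons, ← hw]
            exact ih ht hlz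

-- one step of B's scan over an abstract count function
def pvSStep (c : String → Int) (ml : String × String) (k : String) : String × String :=
  (if c k > c ml.1 then k else ml.1, if c k ≤ c ml.2 then k else ml.2)

-- the invariant: folding insertBy keeps head = running first-argmax, last = running last-argmin
theorem pvLoop_spec (c : String → Int) (ks : List String) :
    ∀ (ys : List String) (m l : String),
      ys.head? = some m → ys.getLast? = some l →
      ys.Pairwise (fun a b => -(c a) ≤ -(c b)) →
      (ks.foldl (fun acc x => pvIns c x acc) ys).head? = some (ks.foldl (pvSStep c) (m, l)).1 ∧
      (ks.foldl (fun acc x => pvIns c x acc) ys).getLast? = some (ks.foldl (pvSStep c) (m, l)).2 := by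
  induction ks with
  | nil => intro ys m l hm hl _; exact ⟨by simpa using hm, by simpa using hl⟩
  | cons k ks ih =>
      intro ys m l hm hl hp
      simp only [List.foldl_cons]
      have h1 := head?_pvIns c k ys m hm
      have h2 := getLast?_pvIns c k ys l hp hl
      have h3 := pairwise_pvIns c k ys hp
      exact ih (pvIns c k ys) _ _ h1 h2 h3

theorem pvBStep_eq (letters : List String) :
    pvBStep (PySem.Dict.counter letters) = pvSStep (fun k => (letters.count k : Int)) := by
  funext ml k
  simp [pvBStep, pvSStep, PySem.Dict.getD_counter]

-- ===== VERDICT =====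
theorem getMostAndLeastFrequent_spec : Claim_equal_getMostAndLeastFrequent := by
  intro letters _ hpre
  have hdict : letters.foldl pvAStep PySem.Dict.empty = PySem.Dict.counter letters := by
    have h : pvAStep = fun d l => d.insert l (d.getD l 0 + 1) := by
      funext d l; exact pvAStep_eq d l
    rw [h, PySem.Dict.foldl_insert_getD_add_one_eq_counter]
  unfold Spec_getMostAndLeastFrequent
  show (let countDict := letters.foldl pvAStep PySem.Dict.empty
        let sortedDict := PySem.List.sorted countDict.keys (fun l => -(countDict.getD l 0)) false
        (PySem.List.pyGetD sortedDict 0 "", PySem.List.pyGetD sortedDict (-1) "")) = _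
  simp only [hdict, PySem.Dict.foldl_insert_getD_add_one_eq_counter,
    getMostAndLeastFrequent_alt]
  have hkeys : (PySem.Dict.counter letters).keys = PySem.Set.ofList letters :=
    PySem.Dict.keys_counter letters
  rw [hkeys]
  have hne : PySem.Set.ofList letters ≠ [] := by
    cases letters with
    | nil => exact absurd rfl hpre
    | cons a t =>
        intro h
        have ha : a ∈ PySem.Set.ofList (a :: t) := by
          simp [PySem.Set.mem_ofList]
        rw [h] at ha
        simp at ha
  obtain ⟨k0, rest, hks⟩ := List.exists_cons_of_ne_nil hne
  rw [hks]
  set c : String → Int := fun k => (letters.count k : Int) with hc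
  have hkey : (fun l => -((PySem.Dict.counter letters).getD l 0)) = fun l => -(c l) := by
    funext l; simp [hc, PySem.Dict.getD_counter]
  rw [hkey, PySem.List.sorted_eq_foldl_insertBy]
  have hfold : (k0 :: rest).foldl
      (fun acc x => PySem.List.insertBy (fun a b => decide ((fun l => -(c l)) a < (fun l => -(c l)) b)) x acc) [] =
      rest.foldl (fun acc x => pvIns c x acc) [k0] := by
    rw [List.foldl_cons]
    rfl
  rw [hfold]
  obtain ⟨hh, hl⟩ := pvLoop_spec c rest [k0] k0 k0 (by simp) (by simp) (by simp)
  have hrne : rest.foldl (fun acc x => pvIns c x acc) [k0] ≠ [] := by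
    intro h; rw [h] at hh; simp at hh
  rw [pvBStep_eq]
  have hget0 : PySem.List.pyGetD (rest.foldl (fun acc x => pvIns c x acc) [k0]) 0 "" =
      (rest.foldl (pvSStep c) (k0, k0)).1 := by
    rw [PySem.List.pyGetD_zero]
    cases hr : rest.foldl (fun acc x => pvIns c x acc) [k0] with
    | nil => exact absurd hr hrne
    | cons r rs =>
        rw [hr] at hh
        simp only [List.head?_cons, Option.some.injEq] at hh
        simpa using hh
  have hgetL : PySem.List.pyGetD (rest.foldl (fun acc x => pvIns c x acc) [k0]) (-1) "" =
      (rest.foldl (pvSStep c) (k0, k0)).2 := by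
    rw [PySem.List.pyGetD_neg_one _ _ hrne]
    have := List.getLast?_eq_some_getLast (l := rest.foldl (fun acc x => pvIns c x acc) [k0]) hrne
    rw [hl] at this
    exact ((Option.some.injEq _ _).mp this).symm
  rw [hget0, hgetL, ← hc]
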